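-- pv_equiv track=rewrite | github.com/DavinderSinghKharoud/Algorithm-Assignments | Assignment_3/nth_min.py | nth_min
-- ===== SOURCE A (Python) =====
-- def nth_min(lst, n):
--     if n <= 1:
--         return min(lst)
--     else:
--         minimum = min(lst)
--         maximum = max(lst)
--         for index, item in enumerate(lst):
--             if item == minimum:
--                 lst[index] = maximum
--                 break
--         return nth_min(lst, n - 1)
-- ===== SOURCE B (Python) =====
-- def nth_min(lst, n):
--     s = sorted(lst)
--     k = n - 1
--     if k < 0:
--         k = 0
--     if k > len(s) - 1:
--         k = len(s) - 1
--     return s[k]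
-- ===== Notes on version B (the rewrite author's own statement) =====
-- stated objective: faster
-- what changed: Replaces the recursive replace-min-with-max loop (which recomputes min and max and rescans the list on every level) by a single sort followed by one clamped index lookup.
import Mathlib
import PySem

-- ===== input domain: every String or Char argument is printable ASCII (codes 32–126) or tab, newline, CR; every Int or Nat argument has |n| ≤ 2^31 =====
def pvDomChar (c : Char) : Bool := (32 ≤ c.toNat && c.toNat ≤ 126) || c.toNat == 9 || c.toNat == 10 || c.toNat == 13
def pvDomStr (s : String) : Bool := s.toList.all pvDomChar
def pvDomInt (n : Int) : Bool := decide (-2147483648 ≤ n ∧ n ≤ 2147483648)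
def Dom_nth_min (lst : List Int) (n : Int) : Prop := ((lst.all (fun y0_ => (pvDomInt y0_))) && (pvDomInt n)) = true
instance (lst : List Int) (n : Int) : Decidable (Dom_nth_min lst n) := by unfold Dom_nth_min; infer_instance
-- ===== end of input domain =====

-- B replaces A's recursive replace-min-with-max scheme by one sort plus a clamped index
-- lookup (equivalence is about the RETURN value only: A mutates lst in place, B does not).

-- ===== PORT A =====
-- the 'for index, item in enumerate(lst): if item == minimum: lst[index] = maximum; break' loop:
-- walk the list, replace the first occurrence of m by M
def pvReplaceFirst : List Int → Int → Int → List Int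
  | [], _, _ => []
  | x :: xs, m, M => if x = m then M :: xs else x :: pvReplaceFirst xs m M

def nth_min (lst : List Int) (n : Int) : Int :=
  if n ≤ 1 then (PySem.List.min? lst (fun x => x)).getD 0
  else
    let minimum := (PySem.List.min? lst (fun x => x)).getD 0
    let maximum := (PySem.List.max? lst (fun x => x)).getD 0
    nth_min (pvReplaceFirst lst minimum maximum) (n - 1)
  termination_by n.toNat
  decreasing_by simp; omega

-- ===== PORT B =====
def nth_min_alt (lst : List Int) (n : Int) : Int :=
  let s := PySem.List.sorted lst (fun x => x) false
  let k1 := if n - 1 < 0 then 0 else n - 1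
  let k2 := if k1 > (s.length : Int) - 1 then (s.length : Int) - 1 else k1
  PySem.List.pyGetD s k2 0

-- ===== PRECONDITION & SPEC =====
-- Python A raises ValueError (min of empty sequence) on the empty list; nothing else raises.
def Pre_nth_min (lst : List Int) (n : Int) : Prop := lst ≠ []
instance (lst : List Int) (n : Int) : Decidable (Pre_nth_min lst n) := by
  unfold Pre_nth_min; infer_instance
def pvWitness_nth_min : List Int × Int := ([3, 1, 2], 2)

def Spec_nth_min (lst : List Int) (n : Int) (out : Int) : Prop := out = nth_min_alt lst n
instance (lst : List Int) (n : Int) (out : Int) : Decidable (Spec_nth_min lst n out) := by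
  unfold Spec_nth_min; infer_instance

-- ===== CLAIM (what is proved, stated in full; the proofs are below) =====
def Claim_equal_nth_min : Prop := ∀ (lst : List Int) (n : Int),
  Dom_nth_min lst n → Pre_nth_min lst n → Spec_nth_min lst n (nth_min lst n)

-- ===== LEMMAS AND PROOFS =====

theorem pvReplaceFirst_length (l : List Int) (m M : Int) :
    (pvReplaceFirst l m M).length = l.length := by
  induction l with
  | nil => rfl
  | cons x xs ih => by_cases h : x = m <;> simp [pvReplaceFirst, h, ih]

theorem pvReplaceFirst_perm (l : List Int) (m M : Int) (h : m ∈ l) :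
    (pvReplaceFirst l m M).Perm (M :: l.erase m) := by
  induction l with
  | nil => cases h
  | cons x xs ih =>
    by_cases hx : x = m
    · subst hx
      simp [pvReplaceFirst, List.erase_cons]
    · have hm : m ∈ xs := by
        cases List.mem_cons.mp h with
        | inl h' => exact absurd h'.symm hx
        | inr h' => exact h'
      have : (x :: pvReplaceFirst xs m M).Perm (x :: (M :: xs.erase m)) :=
        List.Perm.cons x (ih hm)
      have hsw : (x :: (M :: xs.erase m)).Perm (M :: (x :: xs.erase m)) :=
        List.Perm.swap _ _ _
      have := this.trans hsw
      simpa [pvReplaceFirst, hx, List.erase_cons, hx] using this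
  
-- the head of sorted(lst) is min(lst)
theorem sorted_head_min (l : List Int) (m : Int) (t : List Int)
    (hs : PySem.List.sorted l (fun x => x) false = m :: t) :
    (PySem.List.min? l (fun x => x)).getD 0 = m := by
  have hmem : m ∈ l := by
    have : m ∈ PySem.List.sorted l (fun x => x) false := by simp [hs]
    simpa [PySem.List.mem_sorted] using this
  obtain ⟨mn, hmn⟩ : ∃ mn, PySem.List.min? l (fun x => x) = some mn := by
    cases hq : PySem.List.min? l (fun x => x) with
    | none =>
      have : l = [] := (PySem.List.min?_eq_none_iff l (fun x => x)).mp hq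
      subst this; cases hmem
    | some mn => exact ⟨mn, rfl⟩
  have hmnmem : mn ∈ l := PySem.List.min?_mem hmn
  have h1 : mn ≤ m := PySem.List.min?_isMin hmn m hmem
  have h2 : m ≤ mn := PySem.List.key_head_sorted_le l (fun x => x) hs mn hmnmem
  simp [hmn, le_antisymm h1 h2]

theorem pairwise_last_le (l : List Int) (d : Int) (hp : l.Pairwise (· ≤ ·)) :
    ∀ x ∈ l, x ≤ l.getLastD d := by
  induction l with
  | nil => intro x hx; cases hx
  | cons a t ih =>
    intro x hx
    rcases List.pairwise_cons.mp hp with ⟨ha, ht⟩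
    cases t with
    | nil => simp at hx; simp [hx]
    | cons b u =>
      rcases List.mem_cons.mp hx with h | h
      · subst h
        exact le_trans (ha b (by simp)) (ih ht b (by simp))
      · simpa using ih ht x h

-- the last element of sorted(lst) is max(lst)
theorem sorted_last_max (l : List Int) (m : Int) (t : List Int)
    (hs : PySem.List.sorted l (fun x => x) false = m :: t) :
    (m :: t).getLastD 0 = (PySem.List.max? l (fun x => x)).getD 0 := by
  have hlast : (m :: t).getLastD 0 ∈ PySem.List.sorted l (fun x => x) false := by
    have h1 : (m :: t).getLastD 0 = (m :: t).getLast (by simp) := by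
      rw [List.getLastD_eq_getLast?, List.getLast?_eq_some_getLast (by simp)]; rfl
    rw [hs, h1]
    exact List.getLast_mem _
  have hlastl : (m :: t).getLastD 0 ∈ l := by
    simpa [PySem.List.mem_sorted] using hlast
  obtain ⟨mx, hmx⟩ : ∃ mx, PySem.List.max? l (fun x => x) = some mx := by
    cases hq : PySem.List.max? l (fun x => x) with
    | none =>
      have : l = [] := (PySem.List.max?_eq_none_iff l (fun x => x)).mp hq
      subst this
      have hl := PySem.List.length_sorted ([] : List Int) (fun x => x) false
      rw [hs] at hl; simp at hl
    | some mx => exact ⟨mx, rfl⟩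
  have hmxl : mx ∈ l := PySem.List.max?_mem hmx
  have h1 : (m :: t).getLastD 0 ≤ mx := PySem.List.max?_isMax hmx _ hlastl
  have hp : (m :: t).Pairwise (· ≤ ·) := by
    have := PySem.List.sorted_pairwise (xs := l) (key := fun x => x)
    rwa [hs] at this
  have hmxs : mx ∈ (m :: t) := by
    have : mx ∈ PySem.List.sorted l (fun x => x) false := by
      simpa [PySem.List.mem_sorted] using hmxl
    rwa [hs] at this
  have h2 : mx ≤ (m :: t).getLastD 0 := pairwise_last_le _ 0 hp mx hmxs
  rw [hmx]
  simpa using le_antisymm h1 h2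

-- one replace-min-with-max step, seen on the sorted list: drop the head, append the max
theorem sorted_step (l : List Int) (m : Int) (t : List Int)
    (hs : PySem.List.sorted l (fun x => x) false = m :: t) :
    PySem.List.sorted
      (pvReplaceFirst l ((PySem.List.min? l (fun x => x)).getD 0)
        ((PySem.List.max? l (fun x => x)).getD 0)) (fun x => x) false
      = t ++ [(PySem.List.max? l (fun x => x)).getD 0] := by
  set mx := (PySem.List.max? l (fun x => x)).getD 0 with hmxdef
  have hmin : (PySem.List.min? l (fun x => x)).getD 0 = m := sorted_head_min l m t hs
  rw [hmin]
  have hmem : m ∈ l := by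
    have : m ∈ PySem.List.sorted l (fun x => x) false := by simp [hs]
    simpa [PySem.List.mem_sorted] using this
  have hperm0 : (pvReplaceFirst l m mx).Perm (mx :: l.erase m) := pvReplaceFirst_perm l m mx hmem
  have hpl : l.Perm (m :: t) := by
    have := PySem.List.sorted_perm (xs := l) (key := fun x => x) (rev := false)
    rw [hs] at this; exact this.symm
  have herase : (l.erase m).Perm t := by
    have := hpl.erase m
    simpa [List.erase_cons] using this
  have hperm : (t ++ [mx]).Perm (pvReplaceFirst l m mx) := by
    have h1 : (pvReplaceFirst l m mx).Perm (mx :: t) := hperm0.trans (List.Perm.cons mx herase)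
    have h2 : (mx :: t).Perm (t ++ [mx]) := by
      simpa using (List.perm_append_comm (l₁ := [mx]) (l₂ := t))
    exact (h1.trans h2).symm
  have hpsorted : (m :: t).Pairwise (· ≤ ·) := by
    have := PySem.List.sorted_pairwise (xs := l) (key := fun x => x)
    rwa [hs] at this
  have htp : t.Pairwise (· ≤ ·) := (List.pairwise_cons.mp hpsorted).2
  have hmax : ∀ x ∈ t, x ≤ mx := by
    intro x hx
    have hxl : x ∈ l := by
      have : x ∈ PySem.List.sorted l (fun x => x) false := by simp [hs, hx]
      simpa [PySem.List.mem_sorted] using this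
    obtain ⟨mxv, hmxv⟩ : ∃ mxv, PySem.List.max? l (fun x => x) = some mxv := by
      cases hq : PySem.List.max? l (fun x => x) with
      | none =>
        have : l = [] := (PySem.List.max?_eq_none_iff l (fun x => x)).mp hq
        subst this
        have hl := PySem.List.length_sorted ([] : List Int) (fun x => x) false
        rw [hs] at hl; simp at hl
      | some mxv => exact ⟨mxv, rfl⟩
    have := PySem.List.max?_isMax hmxv x hxl
    simpa [hmxdef, hmxv] using this
  have hpw : (t ++ [mx]).Pairwise (fun a b => (fun x => x) a ≤ (fun x => x) b) := by
    simp only []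
    rw [List.pairwise_append]
    exact ⟨htp, by simp, by intro a ha b hb; simp at hb; subst hb; exact hmax a ha⟩
  exact PySem.List.sorted_id_eq_of_perm_of_pairwise _ _ hperm hpw

theorem pyGetD_int (s : List Int) (i : Int) (h0 : 0 ≤ i) (h1 : i < (s.length : Int)) :
    PySem.List.pyGetD s i 0 = s.getD i.toNat 0 := by
  rw [PySem.List.pyGetD_eq_getElem s 0 h0 h1, List.getD_eq_getElem?_getD,
    List.getElem?_eq_getElem (by omega)]
  rfl

-- index bookkeeping for B on the sorted list
theorem alt_closed (l : List Int) (n : Int) (h : l ≠ []) :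
    nth_min_alt l n =
      (PySem.List.sorted l (fun x => x) false).getD
        (min (max (n - 1) 0).toNat (l.length - 1)) 0 := by
  have hlen : (PySem.List.sorted l (fun x => x) false).length = l.length :=
    PySem.List.length_sorted ..
  have hl0 : 0 < l.length := List.length_pos_iff.mpr h
  unfold nth_min_alt
  simp only []
  set s := PySem.List.sorted l (fun x => x) false with hsdef
  set k2 : Int := if (if n - 1 < 0 then 0 else n - 1) > (s.length : Int) - 1
      then (s.length : Int) - 1 else (if n - 1 < 0 then 0 else n - 1) with hk2
  have hge : 0 ≤ k2 := by rw [hk2]; split_ifs <;> omega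
  have hlt : k2 < (s.length : Int) := by rw [hk2]; split_ifs <;> omega
  rw [pyGetD_int s k2 hge hlt]
  congr 1
  rw [hk2, hlen]
  split_ifs <;> omega

-- the main induction: A's recursion equals B's lookup, by induction on the fuel (n-1).toNat
theorem main_lemma : ∀ (k : Nat) (l : List Int) (n : Int), (n - 1).toNat = k → l ≠ [] →
    nth_min l n = nth_min_alt l n := by
  intro k
  induction k with
  | zero =>
    intro l n hk h
    have hn : n ≤ 1 := by omega
    obtain ⟨m, t, hs⟩ : ∃ m t, PySem.List.sorted l (fun x => x) false = m :: t := by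
      cases hq : PySem.List.sorted l (fun x => x) false with
      | nil =>
        have := PySem.List.length_sorted (xs := l) (key := fun x => x) (rev := false)
        rw [hq] at this
        exact absurd (List.length_eq_zero_iff.mp this.symm) h
      | cons m t => exact ⟨m, t, rfl⟩
    rw [alt_closed l n h]
    have hmin : (max (n - 1) 0).toNat = 0 := by omega
    rw [hmin]
    simp only [Nat.zero_min]
    rw [nth_min]
    simp [hn, hs, sorted_head_min l m t hs]
  | succ k ih =>
    intro l n hk h
    have hn : ¬ n ≤ 1 := by omega
    obtain ⟨m, t, hs⟩ : ∃ m t, PySem.List.sorted l (fun x => x) false = m :: t := by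
      cases hq : PySem.List.sorted l (fun x => x) false with
      | nil =>
        have := PySem.List.length_sorted (xs := l) (key := fun x => x) (rev := false)
        rw [hq] at this
        exact absurd (List.length_eq_zero_iff.mp this.symm) h
      | cons m t => exact ⟨m, t, rfl⟩
    set mn := (PySem.List.min? l (fun x => x)).getD 0 with hmn
    set mx := (PySem.List.max? l (fun x => x)).getD 0 with hmx
    set l' := pvReplaceFirst l mn mx with hl'
    have hlen' : l'.length = l.length := pvReplaceFirst_length ..
    have hlen : l.length = t.length + 1 := by
      have := PySem.List.length_sorted (xs := l) (key := fun x => x) (rev := false)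
      rw [hs] at this; simpa using this.symm
    have hne' : l' ≠ [] := by
      intro hc
      rw [hc] at hlen'
      simp at hlen'; omega
    have hstep : PySem.List.sorted l' (fun x => x) false = t ++ [mx] := sorted_step l m t hs
    rw [nth_min]
    simp only [hn, if_false]
    rw [← hmn, ← hmx, ← hl']
    rw [ih l' (n - 1) (by omega) hne']
    rw [alt_closed l' (n - 1) hne', alt_closed l n h, hstep, hs, hlen', hlen]
    by_cases hc : (n - 1).toNat ≤ t.length
    · -- the wanted slot is still inside the list: B reads t[(n-1)-1] on both sides
      have h1 : min (max (n - 1 - 1) 0).toNat (t.length + 1 - 1) = (n - 1).toNat - 1 := by omega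
      have h2 : min (max (n - 1) 0).toNat (t.length + 1 - 1) = (n - 1).toNat := by omega
      rw [h1, h2]
      have hnn : 1 ≤ (n - 1).toNat := by omega
      rcases Nat.exists_eq_add_of_le hnn with ⟨j, hj⟩
      rw [hj]
      simp only [Nat.add_comm 1 j, Nat.add_sub_cancel]
      rw [List.getD_cons_succ]
      have hjt : j < t.length := by omega
      rw [List.getD_eq_getElem?_getD, List.getD_eq_getElem?_getD,
        List.getElem?_append_left hjt]
    · -- n - 1 exceeds the list: both sides read the clamped last slot
      have h1 : min (max (n - 1 - 1) 0).toNat (t.length + 1 - 1) = t.length := by omega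
      have h2 : min (max (n - 1) 0).toNat (t.length + 1 - 1) = t.length := by omega
      rw [h1, h2]
      have hlastmx := sorted_last_max l m t hs
      rw [← hmx] at hlastmx
      rw [List.getD_eq_getElem?_getD, List.getElem?_append_right (le_refl _)]
      simp only [Nat.sub_self, List.getElem?_cons_zero, Option.getD_some]
      have hlast : (m :: t).getD t.length 0 = (m :: t).getLastD 0 := by
        rw [List.getD_eq_getElem?_getD, List.getElem?_eq_getElem (by simp)]
        simp [List.getLastD_eq_getLast?, List.getLast?_eq_getElem?]
      rw [hlast, hlastmx]
-- ===== VERDICT (by name: the statement is the Claim_ definition above) =====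
theorem nth_min_spec : Claim_equal_nth_min := by
  intro lst n _ hpre
  exact main_lemma ((n - 1).toNat) lst n rfl hpre
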